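-- pv_equiv track=rewrite | github.com/thinktwice13/algos | codility/py/8-equi-lieader.py | fn
-- ===== SOURCE A (Python) =====
-- def fn(A):
--     left_vals, left_max = {}, 0
--     right_vals, right_max = {}, 0
--     mid = len(A) // 2
--     for i in range(len(A)):
--         ii = len(A) - i - 1
--         l, r = A[i], A[ii]
--         left_vals[l] = left_vals.get(l, 0) + 1
--         left_max = max(left_max, left_vals[l])
--         right_vals[r] = right_vals.get(r, 0) + 1
--         right_max = max(right_max, right_vals[r])
--         if left_max == right_max and left_max + right_max > len(A):
--             return i
--
--     return -1
-- ===== SOURCE B (Python) =====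
-- def fn(A):
--     n = len(A)
--     # Boyer-Moore majority vote: the equal-maxima condition with sum > n can only
--     # be met by the unique majority element of the whole array.
--     cand, cnt = None, 0
--     for x in A:
--         if cnt == 0:
--             cand, cnt = x, 1
--         elif x == cand:
--             cnt += 1
--         else:
--             cnt -= 1
--     total = A.count(cand) if cnt > 0 else 0
--     if 2 * total <= n:
--         return -1
--     # prefix counts of the majority candidate: pref[k] = count of cand in A[:k]
--     pref = [0]
--     c = 0
--     for x in A:
--         if x == cand:
--             c += 1
--         pref.append(c)
--     for i in range(n):
--         lc = pref[i + 1]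
--         rc = total - pref[n - 1 - i]
--         if lc == rc and lc + rc > n:
--             return i
--     return -1
-- ===== Notes on version B (the rewrite author's own statement) =====
-- stated objective: faster
-- what changed: A tracks per-element frequency dicts from both ends with running maxima; B instead runs a Boyer-Moore majority vote to find the unique element able to satisfy the equal-maxima condition (both maxima must exceed len(A)/2, so each belongs to the global majority element), then decides the answer from prefix counts of that single candidate.
import Mathlib
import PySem

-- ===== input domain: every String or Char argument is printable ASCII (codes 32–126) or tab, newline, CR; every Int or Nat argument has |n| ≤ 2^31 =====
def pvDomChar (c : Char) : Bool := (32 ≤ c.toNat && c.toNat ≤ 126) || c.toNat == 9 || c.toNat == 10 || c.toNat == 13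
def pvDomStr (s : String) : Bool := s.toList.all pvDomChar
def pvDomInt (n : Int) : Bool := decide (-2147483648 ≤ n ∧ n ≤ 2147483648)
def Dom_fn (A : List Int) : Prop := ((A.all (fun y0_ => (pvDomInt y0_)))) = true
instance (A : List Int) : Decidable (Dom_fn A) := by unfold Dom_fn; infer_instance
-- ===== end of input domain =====

-- B replaces A's dict-of-all-frequencies scan with two running maxima by a different
-- algorithm: a Boyer-Moore majority vote finds the only element able to satisfy the
-- equal-maxima condition (both maxima must exceed len(A)/2), then prefix counts of
-- that single candidate decide the answer (objective: faster, measured constant-factor).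

-- ===== PORT A =====
-- A's single loop over range(len(A)): two counters and two running maxima, early return.
def fnGo (A : List Int) (leftVals rightVals : PySem.Dict Int Int) (leftMax rightMax : Int) :
    List Int → Int
  | [] => -1
  | i :: rest =>
    let ii : Int := (A.length : Int) - i - 1
    -- i and ii are always in range for indices produced by range(len(A)), so pyGetD is exact here
    let l := PySem.List.pyGetD A i 0
    let r := PySem.List.pyGetD A ii 0
    let leftVals' := leftVals.insert l (leftVals.getD l 0 + 1)
    let leftMax' := max leftMax (leftVals'.getD l 0)
    let rightVals' := rightVals.insert r (rightVals.getD r 0 + 1)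
    let rightMax' := max rightMax (rightVals'.getD r 0)
    if leftMax' = rightMax' ∧ leftMax' + rightMax' > (A.length : Int) then i
    else fnGo A leftVals' rightVals' leftMax' rightMax' rest

def fn (A : List Int) : Int :=
  let _mid := PySem.Int.floordiv (A.length : Int) 2   -- A computes (and never uses) mid
  fnGo A PySem.Dict.empty PySem.Dict.empty 0 0
    (PySem.List.pyRange 0 (A.length : Int) 1)

-- ===== PORT B =====
-- Boyer-Moore majority vote loop
def fnVote : Option Int × Int → List Int → Option Int × Int
  | s, [] => s
  | (cand, cnt), x :: xs =>
    if cnt = 0 then fnVote (some x, 1) xs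
    else if some x = cand then fnVote (cand, cnt + 1) xs
    else fnVote (cand, cnt - 1) xs

-- prefix-count loop: running count of the candidate, one entry appended per element
def fnPref (cand : Option Int) (c : Int) : List Int → List Int
  | [] => []
  | x :: xs =>
    let c' := if some x = cand then c + 1 else c
    c' :: fnPref cand c' xs

-- final check loop over range(n)
def fnLoop (n total : Int) (pref : List Int) : List Int → Int
  | [] => -1
  | i :: rest =>
    let lc := PySem.List.pyGetD pref (i + 1) 0
    let rc := total - PySem.List.pyGetD pref (n - 1 - i) 0
    if lc = rc ∧ lc + rc > n then i else fnLoop n total pref rest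

def fn_alt (A : List Int) : Int :=
  let n : Int := A.length
  let s := fnVote (none, 0) A
  -- cand is None only when cnt = 0, so Python's A.count(cand) is only reached with cand ≠ None
  let total : Int :=
    if 0 < s.2 then (match s.1 with | some v => (PySem.List.count A v : Int) | none => 0) else 0
  if 2 * total ≤ n then -1
  else fnLoop n total ((0 : Int) :: fnPref s.1 0 A) (PySem.List.pyRange 0 n 1)

-- ===== PRECONDITION & SPEC =====
def Spec_fn (A : List Int) (out : Int) : Prop := out = fn_alt A
instance (A : List Int) (out : Int) : Decidable (Spec_fn A out) := by unfold Spec_fn; infer_instance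

-- ===== CLAIM (what is proved, stated in full; the proofs are below) =====
def Claim_equal_fn : Prop := ∀ (A : List Int), Dom_fn A → Spec_fn A (fn A)

-- ===== LEMMAS AND PROOFS =====

-- integer-valued count, and "m is the maximum element frequency of p"
def cntZ (p : List Int) (v : Int) : Int := (p.count v : Int)

def isMaxFreq (p : List Int) (m : Int) : Prop :=
  (∀ v ∈ p, cntZ p v ≤ m) ∧ (m = 0 ∨ ∃ v ∈ p, m = cntZ p v)

lemma count_add_count_le (p : List Int) (u w : Int) (h : u ≠ w) :
    p.count u + p.count w ≤ p.length := by
  induction p with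
  | nil => simp
  | cons x xs ih =>
    simp only [List.count_cons, List.length_cons, beq_iff_eq]
    split_ifs with h1 h2 h2 <;> omega

lemma maxFreq_unique {p : List Int} {m m' : Int}
    (h : isMaxFreq p m) (h' : isMaxFreq p m') : m = m' := by
  obtain ⟨hb, hm⟩ := h
  obtain ⟨hb', hm'⟩ := h'
  rcases hm with rfl | ⟨u, hu, rfl⟩
  · rcases hm' with rfl | ⟨u, hu, rfl⟩
    · rfl
    · have h1 := hb u hu
      have h2 : 0 < p.count u := List.count_pos_iff.mpr hu
      unfold cntZ at *; omega
  · rcases hm' with rfl | ⟨w, hw, rfl⟩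
    · have h1 := hb' u hu
      have h2 : 0 < p.count u := List.count_pos_iff.mpr hu
      unfold cntZ at *; omega
    · have h1 := hb' u hu
      have h2 := hb w hw
      omega

lemma maj_unique (A : List Int) (u w : Int)
    (hu : 2 * cntZ A u > (A.length : Int)) (hw : 2 * cntZ A w > (A.length : Int)) : u = w := by
  by_contra hne
  have := count_add_count_le A u w hne
  unfold cntZ at *; omega

lemma count_take_drop (A : List Int) (j : Nat) (v : Int) :
    (A.take j).count v + (A.drop j).count v = A.count v := by
  rw [← List.count_append, List.take_append_drop]

-- with a global majority candidate v, the max frequency of any window holding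
-- more than half of A is the count of v in that window
lemma maxFreq_of_major {p : List Int} {v : Int} {n : Int}
    (hlen : (p.length : Int) ≤ n) (hc : 2 * cntZ p v > n) :
    isMaxFreq p (cntZ p v) := by
  constructor
  · intro u hu
    by_cases huv : u = v
    · subst huv; exact le_refl _
    · have := count_add_count_le p u v huv
      unfold cntZ at *; omega
  · right
    refine ⟨v, ?_, rfl⟩
    have hpos : 0 < p.count v := by unfold cntZ at hc; omega
    exact List.count_pos_iff.mp hpos

lemma test_imp_major {p : List Int} {A : List Int} {m : Int}
    (hp : p.Sublist A) (hL : isMaxFreq p m)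
    (hgt : 2 * m > (A.length : Int)) :
    ∃ u, 2 * cntZ A u > (A.length : Int) ∧ m = cntZ p u := by
  have hn : (0 : Int) ≤ A.length := by positivity
  rcases hL.2 with rfl | ⟨u, hu, rfl⟩
  · omega
  · refine ⟨u, ?_, rfl⟩
    have := hp.count_le u
    unfold cntZ at *; omega

-- L2: with a global majority v, A's equal-maxima test equals B's count-of-v test
lemma test_iff (A : List Int) (v : Int) (hv : 2 * cntZ A v > (A.length : Int))
    (k : Nat) (mL mR : Int)
    (hL : isMaxFreq (A.take (k+1)) mL) (hR : isMaxFreq (A.drop (A.length - k - 1)) mR) :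
    (mL = mR ∧ mL + mR > (A.length : Int)) ↔
      (cntZ (A.take (k+1)) v = cntZ (A.drop (A.length - k - 1)) v ∧
       cntZ (A.take (k+1)) v + cntZ (A.drop (A.length - k - 1)) v > (A.length : Int)) := by
  have hn : (0 : Int) ≤ A.length := by positivity
  constructor
  · rintro ⟨heq, hgt⟩
    obtain ⟨u, hu, hmu⟩ := test_imp_major (A.take_sublist (k+1)) hL (by omega)
    obtain ⟨w, hw, hmw⟩ := test_imp_major (A.drop_sublist (A.length - k - 1)) hR (by omega)
    have huv := maj_unique A u v hu hv
    have hwv := maj_unique A w v hw hv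
    subst huv; subst hwv
    omega
  · rintro ⟨heq, hgt⟩
    have hlenp : ((A.take (k+1)).length : Int) ≤ A.length := by
      simp [List.length_take]
    have hlenq : ((A.drop (A.length - k - 1)).length : Int) ≤ A.length := by
      simp [List.length_drop]
    have h1 : isMaxFreq (A.take (k+1)) (cntZ (A.take (k+1)) v) :=
      maxFreq_of_major hlenp (by omega)
    have h2 : isMaxFreq (A.drop (A.length - k - 1)) (cntZ (A.drop (A.length - k - 1)) v) :=
      maxFreq_of_major hlenq (by omega)
    have e1 := maxFreq_unique hL h1
    have e2 := maxFreq_unique hR h2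
    omega

-- Boyer-Moore vote: cnt stays nonnegative, plus the classical bound invariant
def slack (v : Int) (s : Option Int × Int) : Int := if s.1 = some v then s.2 else -s.2

lemma slack_def (v : Int) (c0 : Option Int) (k : Int) :
    slack v (c0, k) = if c0 = some v then k else -k := rfl

lemma vote_nonneg (l : List Int) : ∀ (c0 : Option Int) (k0 : Int), 0 ≤ k0 →
    0 ≤ (fnVote (c0, k0) l).2 := by
  induction l with
  | nil => intro c0 k0 h; simpa [fnVote] using h
  | cons x xs ih =>
    intro c0 k0 h
    by_cases h1 : k0 = 0
    · rw [show fnVote (c0, k0) (x :: xs) = fnVote (some x, 1) xs from by simp [fnVote, h1]]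
      exact ih _ _ (by omega)
    · by_cases h2 : some x = c0
      · rw [show fnVote (c0, k0) (x :: xs) = fnVote (c0, k0 + 1) xs from by
          simp [fnVote, h1, h2]]
        exact ih _ _ (by omega)
      · rw [show fnVote (c0, k0) (x :: xs) = fnVote (c0, k0 - 1) xs from by
          simp [fnVote, h1, h2]]
        exact ih _ _ (by omega)

lemma vote_bound (l : List Int) (v : Int) : ∀ (c0 : Option Int) (k0 : Int),
    2 * (l.count v : Int) ≤ (l.length : Int) - slack v (c0, k0) + slack v (fnVote (c0, k0) l) := by
  induction l with
  | nil => intro c0 k0; simp [fnVote]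
  | cons x xs ih =>
    intro c0 k0
    simp only [List.count_cons, List.length_cons, beq_iff_eq]
    push_cast
    by_cases h1 : k0 = 0
    · rw [show fnVote (c0, k0) (x :: xs) = fnVote (some x, 1) xs from by simp [fnVote, h1]]
      have H := ih (some x) 1
      rw [slack_def] at H
      rw [slack_def]
      subst h1
      simp only [Option.some.injEq] at H
      split_ifs at H ⊢ <;> omega
    · by_cases h2 : some x = c0
      · rw [show fnVote (c0, k0) (x :: xs) = fnVote (c0, k0 + 1) xs from by simp [fnVote, h1, h2]]
        have H := ih c0 (k0 + 1)
        rw [slack_def] at H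
        rw [slack_def]
        subst h2
        simp only [Option.some.injEq] at H ⊢
        split_ifs at H ⊢ <;> omega
      · rw [show fnVote (c0, k0) (x :: xs) = fnVote (c0, k0 - 1) xs from by simp [fnVote, h1, h2]]
        have H := ih c0 (k0 - 1)
        rw [slack_def] at H
        rw [slack_def]
        split_ifs at H ⊢ <;> first | omega | (exfalso; apply h2; subst_vars; simp_all)

lemma vote_major (A : List Int) (v : Int) (hv : 2 * (A.count v : Int) > (A.length : Int)) :
    (fnVote (none, 0) A).1 = some v ∧ 0 < (fnVote (none, 0) A).2 := by
  have h := vote_bound A v none 0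
  have hnn := vote_nonneg A none 0 le_rfl
  rw [slack_def] at h
  simp only [reduceCtorEq, if_false, neg_zero, sub_zero] at h
  unfold slack at h
  split_ifs at h with hc
  · exact ⟨hc, by omega⟩
  · omega

-- prefix table characterisation: entry j of (0 :: fnPref (some v) 0 A) is count of v in A.take j
lemma fnPref_length (cand : Option Int) (c : Int) (l : List Int) :
    (fnPref cand c l).length = l.length := by
  induction l generalizing c with
  | nil => simp [fnPref]
  | cons x xs ih => simp [fnPref, ih]

lemma fnPref_getElem (v : Int) (l : List Int) (c : Int) (j : Nat) (hj : j < l.length) :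
    (fnPref (some v) c l)[j]'(by rw [fnPref_length]; exact hj) =
      c + ((l.take (j+1)).count v : Int) := by
  induction l generalizing c j with
  | nil => simp at hj
  | cons x xs ih =>
    cases j with
    | zero =>
      simp only [fnPref, List.getElem_cons_zero, List.take_succ_cons, List.take_zero,
        List.count_cons, List.count_nil, beq_iff_eq, Option.some.injEq]
      split_ifs with hx <;> simp_all
    | succ j =>
      have hj' : j < xs.length := by simpa using hj
      simp only [fnPref, List.getElem_cons_succ, List.take_succ_cons, List.count_cons,
        beq_iff_eq, Option.some.injEq]
      rw [ih (if x = v then c + 1 else c) j hj']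
      split_ifs with hx <;> push_cast <;> omega

lemma pref_lookup (A : List Int) (v : Int) (j : Nat) (hj : j ≤ A.length) :
    PySem.List.pyGetD ((0 : Int) :: fnPref (some v) 0 A) (j : Int) 0 =
      ((A.take j).count v : Int) := by
  have hlen : (j : Nat) < ((0 : Int) :: fnPref (some v) 0 A).length := by
    simp [fnPref_length]; omega
  rw [PySem.List.pyGetD_eq_getElem _ _ (by positivity) (by exact_mod_cast hlen)]
  cases j with
  | zero => simp
  | succ j =>
    have hj' : j < A.length := by omega
    have h := fnPref_getElem v A 0 j hj'
    simp only [Int.toNat_natCast, List.getElem_cons_succ]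
    rw [h]; simp

-- A-side loop invariant: the dicts are the window counters, the maxima are the window maxima
def InvA (A : List Int) (k : Nat) (cL cR : PySem.Dict Int Int) (bL bR : Int) : Prop :=
  (∀ v, cL.getD v 0 = cntZ (A.take k) v) ∧ isMaxFreq (A.take k) bL ∧
  (∀ v, cR.getD v 0 = cntZ (A.drop (A.length - k)) v) ∧ isMaxFreq (A.drop (A.length - k)) bR

lemma take_succ_concat (A : List Int) (k : Nat) (h : k < A.length) :
    A.take (k+1) = A.take k ++ [A[k]] := by
  rw [List.take_add_one]; simp [List.getElem?_eq_getElem h]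

lemma maxFreq_append (p : List Int) (x : Int) (b : Int) (h : isMaxFreq p b) :
    isMaxFreq (p ++ [x]) (max b (cntZ (p ++ [x]) x)) := by
  obtain ⟨hb, hm⟩ := h
  have hcx : cntZ (p ++ [x]) x = cntZ p x + 1 := by
    unfold cntZ; rw [List.count_append]; simp
  constructor
  · intro v hv
    by_cases hvx : v = x
    · subst hvx; exact le_max_right _ _
    · have hvp : v ∈ p := by
        rcases List.mem_append.mp hv with h' | h'
        · exact h'
        · simp only [List.mem_singleton] at h'; exact absurd h' hvx
      have he : cntZ (p ++ [x]) v = cntZ p v := by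
        unfold cntZ; rw [List.count_append]
        simp [Ne.symm hvx]
      rw [he]
      exact le_trans (hb v hvp) (le_max_left _ _)
  · right
    rcases le_or_gt b (cntZ (p ++ [x]) x) with hle | hlt
    · exact ⟨x, by simp, max_eq_right hle⟩
    · rcases hm with rfl | ⟨u, hu, rfl⟩
      · have : (0:Int) ≤ cntZ p x := by unfold cntZ; positivity
        omega
      · by_cases hux : u = x
        · subst hux; omega
        · refine ⟨u, List.mem_append.mpr (Or.inl hu), ?_⟩
          have he : cntZ (p ++ [x]) u = cntZ p u := by
            unfold cntZ; rw [List.count_append]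
            simp [Ne.symm hux]
          rw [he, max_eq_left (le_of_lt hlt)]

lemma maxFreq_cons (p : List Int) (x : Int) (b : Int) (h : isMaxFreq p b) :
    isMaxFreq (x :: p) (max b (cntZ (x :: p) x)) := by
  obtain ⟨hb, hm⟩ := h
  have hcx : cntZ (x :: p) x = cntZ p x + 1 := by
    unfold cntZ; simp
  constructor
  · intro v hv
    by_cases hvx : v = x
    · subst hvx; exact le_max_right _ _
    · have hvp : v ∈ p := by
        rcases List.mem_cons.mp hv with h' | h'
        · exact absurd h' hvx
        · exact h'
      have he : cntZ (x :: p) v = cntZ p v := by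
        unfold cntZ; simp [Ne.symm hvx]
      rw [he]
      exact le_trans (hb v hvp) (le_max_left _ _)
  · right
    rcases le_or_gt b (cntZ (x :: p) x) with hle | hlt
    · exact ⟨x, by simp, max_eq_right hle⟩
    · rcases hm with rfl | ⟨u, hu, rfl⟩
      · have : (0:Int) ≤ cntZ p x := by unfold cntZ; positivity
        omega
      · by_cases hux : u = x
        · subst hux; omega
        · refine ⟨u, List.mem_cons_of_mem _ hu, ?_⟩
          have he : cntZ (x :: p) u = cntZ p u := by
            unfold cntZ; simp [Ne.symm hux]
          rw [he, max_eq_left (le_of_lt hlt)]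

-- one step of A's loop preserves the invariant
lemma InvA_step (A : List Int) (k : Nat) (hk : k < A.length)
    (cL cR : PySem.Dict Int Int) (bL bR : Int) (h : InvA A k cL cR bL bR) :
    InvA A (k+1)
      (cL.insert (A[k]) (cL.getD (A[k]) 0 + 1))
      (cR.insert (A[A.length-k-1]'(by omega)) (cR.getD (A[A.length-k-1]'(by omega)) 0 + 1))
      (max bL ((cL.insert (A[k]) (cL.getD (A[k]) 0 + 1)).getD (A[k]) 0))
      (max bR ((cR.insert (A[A.length-k-1]'(by omega))
          (cR.getD (A[A.length-k-1]'(by omega)) 0 + 1)).getD (A[A.length-k-1]'(by omega)) 0)) := by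
  obtain ⟨hdL, hmL, hdR, hmR⟩ := h
  have htake := take_succ_concat A k hk
  have hidx : A.length - k - 1 < A.length := by omega
  have hdrop : A.drop (A.length - (k+1)) = A[A.length-k-1]'hidx :: A.drop (A.length - k) := by
    have h1 : A.length - (k+1) = A.length - k - 1 := by omega
    have h2 : A.length - k - 1 + 1 = A.length - k := by omega
    rw [h1, List.drop_eq_getElem_cons hidx, h2]
  have hdL' : ∀ v, (cL.insert (A[k]) (cL.getD (A[k]) 0 + 1)).getD v 0 = cntZ (A.take (k+1)) v := by
    intro v
    rw [PySem.Dict.getD_insert, htake]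
    unfold cntZ
    rw [List.count_append]
    by_cases hv : v = A[k]
    · subst hv; rw [if_pos rfl, hdL]; unfold cntZ; simp
    · rw [if_neg hv, hdL]; unfold cntZ; simp [Ne.symm hv]
  have hdR' : ∀ v, (cR.insert (A[A.length-k-1]'hidx) (cR.getD (A[A.length-k-1]'hidx) 0 + 1)).getD v 0
      = cntZ (A.drop (A.length - (k+1))) v := by
    intro v
    rw [PySem.Dict.getD_insert, hdrop]
    unfold cntZ
    rw [List.count_cons]
    by_cases hv : v = A[A.length-k-1]'hidx
    · subst hv; rw [if_pos rfl, hdR]; unfold cntZ; simp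
    · rw [if_neg hv, hdR]; unfold cntZ; simp [Ne.symm hv]
  refine ⟨hdL', ?_, hdR', ?_⟩
  · rw [hdL' (A[k])]
    have hmx := maxFreq_append (A.take k) (A[k]) bL hmL
    rw [← htake] at hmx
    exact hmx
  · rw [hdR' (A[A.length-k-1]'hidx)]
    have hmx := maxFreq_cons (A.drop (A.length - k)) (A[A.length-k-1]'hidx) bR hmR
    rw [← hdrop] at hmx
    exact hmx

-- the main induction, majority case: A's fused loop equals B's check loop
lemma goA_eq_loopB (A : List Int) (v : Int) (hv : 2 * cntZ A v > (A.length : Int))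
    (k : Nat) (hk : k ≤ A.length) (cL cR : PySem.Dict Int Int) (bL bR : Int)
    (hinv : InvA A k cL cR bL bR) :
    fnGo A cL cR bL bR (PySem.List.pyRange (k : Int) (A.length : Int) 1) =
      fnLoop (A.length : Int) (cntZ A v) ((0 : Int) :: fnPref (some v) 0 A)
        (PySem.List.pyRange (k : Int) (A.length : Int) 1) := by
  rcases eq_or_lt_of_le hk with heq | hlt
  · subst heq
    simp [fnGo, fnLoop, PySem.List.pyRange]
  · have hcons : PySem.List.pyRange (k : Int) (A.length : Int) 1 =
        (k : Int) :: PySem.List.pyRange ((k : Int) + 1) (A.length : Int) 1 :=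
      PySem.List.pyRange_one_cons (by exact_mod_cast hlt)
    rw [hcons]
    have hidx : A.length - k - 1 < A.length := by omega
    have hgetL : PySem.List.pyGetD A (k : Int) 0 = A[k] := by
      rw [PySem.List.pyGetD_eq_getElem A 0 (by positivity) (by exact_mod_cast hlt)]
      simp
    have hgetR : PySem.List.pyGetD A ((A.length : Int) - (k:Int) - 1) 0 = A[A.length-k-1]'hidx := by
      rw [PySem.List.pyGetD_eq_getElem A 0 (by omega) (by omega)]
      congr 1
      omega
    have hstep := InvA_step A k hlt cL cR bL bR hinv
    obtain ⟨hdL', hmL', hdR', hmR'⟩ := hstep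
    -- B-side lookups at i = k
    have hlc : PySem.List.pyGetD ((0 : Int) :: fnPref (some v) 0 A) ((k:Int) + 1) 0 =
        cntZ (A.take (k+1)) v := by
      have := pref_lookup A v (k+1) (by omega)
      rw [show ((k:Int) + 1) = ((k+1 : Nat) : Int) from by push_cast; ring]
      exact this
    have hrc : (cntZ A v) - PySem.List.pyGetD ((0 : Int) :: fnPref (some v) 0 A)
        ((A.length : Int) - 1 - (k:Int)) 0 = cntZ (A.drop (A.length - k - 1)) v := by
      have hj : A.length - k - 1 ≤ A.length := by omega
      have := pref_lookup A v (A.length - k - 1) hj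
      rw [show ((A.length : Int) - 1 - (k:Int)) = ((A.length - k - 1 : Nat) : Int) from by omega]
      rw [this]
      have hcc := count_take_drop A (A.length - k - 1) v
      unfold cntZ
      omega
    -- unfold one step of both loops
    simp only [fnGo, fnLoop, hgetL, hgetR]
    rw [hlc, hrc]
    -- identify A's test with B's test
    have hLm : (max bL ((cL.insert (A[k]) (cL.getD (A[k]) 0 + 1)).getD (A[k]) 0)) =
        (max bL ((cL.insert (A[k]) (cL.getD (A[k]) 0 + 1)).getD (A[k]) 0)) := rfl
    have hteq := test_iff A v hv k _ _ hmL'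
      (by
        have h1 : A.length - (k+1) = A.length - k - 1 := by omega
        rw [← h1]; exact hmR')
    by_cases hB : (cntZ (A.take (k+1)) v = cntZ (A.drop (A.length - k - 1)) v ∧
        cntZ (A.take (k+1)) v + cntZ (A.drop (A.length - k - 1)) v > (A.length : Int))
    · rw [if_pos (hteq.mpr hB), if_pos hB]
    · rw [if_neg (fun h => hB (hteq.mp h)), if_neg hB]
      have hk1 : ((k:Int) + 1) = ((k+1 : Nat) : Int) := by push_cast; ring
      rw [hk1]
      exact goA_eq_loopB A v hv (k+1) hlt _ _ _ _ ⟨hdL', hmL', hdR', hmR'⟩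
termination_by A.length - k

-- the main induction, no-majority case: A's test never fires, A returns -1
lemma goA_eq_neg (A : List Int) (hnm : ∀ v, 2 * cntZ A v ≤ (A.length : Int))
    (k : Nat) (hk : k ≤ A.length) (cL cR : PySem.Dict Int Int) (bL bR : Int)
    (hinv : InvA A k cL cR bL bR) :
    fnGo A cL cR bL bR (PySem.List.pyRange (k : Int) (A.length : Int) 1) = -1 := by
  rcases eq_or_lt_of_le hk with heq | hlt
  · subst heq
    simp [fnGo, PySem.List.pyRange]
  · have hcons : PySem.List.pyRange (k : Int) (A.length : Int) 1 =
        (k : Int) :: PySem.List.pyRange ((k : Int) + 1) (A.length : Int) 1 :=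
      PySem.List.pyRange_one_cons (by exact_mod_cast hlt)
    rw [hcons]
    have hidx : A.length - k - 1 < A.length := by omega
    have hgetL : PySem.List.pyGetD A (k : Int) 0 = A[k] := by
      rw [PySem.List.pyGetD_eq_getElem A 0 (by positivity) (by exact_mod_cast hlt)]
      simp
    have hgetR : PySem.List.pyGetD A ((A.length : Int) - (k:Int) - 1) 0 = A[A.length-k-1]'hidx := by
      rw [PySem.List.pyGetD_eq_getElem A 0 (by omega) (by omega)]
      congr 1
      omega
    have hstep := InvA_step A k hlt cL cR bL bR hinv
    obtain ⟨hdL', hmL', hdR', hmR'⟩ := hstep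
    simp only [fnGo, hgetL, hgetR]
    rw [if_neg]
    · have hk1 : ((k:Int) + 1) = ((k+1 : Nat) : Int) := by push_cast; ring
      rw [hk1]
      exact goA_eq_neg A hnm (k+1) hlt _ _ _ _ ⟨hdL', hmL', hdR', hmR'⟩
    · rintro ⟨heq, hgt⟩
      obtain ⟨u, hu, -⟩ := test_imp_major (A.take_sublist (k+1)) hmL' (by omega)
      have := hnm u
      omega
termination_by A.length - k

lemma InvA_zero (A : List Int) : InvA A 0 PySem.Dict.empty PySem.Dict.empty 0 0 := by
  refine ⟨?_, ?_, ?_, ?_⟩ <;> simp [cntZ, isMaxFreq]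

-- ===== VERDICT (by name: the statement is the Claim_ definition above) =====
theorem fn_spec : Claim_equal_fn := by
  intro A _
  show fn A = fn_alt A
  unfold fn fn_alt
  dsimp only
  by_cases hmaj : ∃ v, 2 * cntZ A v > (A.length : Int)
  · obtain ⟨v, hv⟩ := hmaj
    have hcast : 2 * (A.count v : Int) > (A.length : Int) := hv
    obtain ⟨hc, hk⟩ := vote_major A v hcast
    rw [hc]
    simp only [if_pos hk]
    rw [PySem.List.count_eq]
    rw [if_neg (by unfold cntZ at hv; omega)]
    have h := goA_eq_loopB A v hv 0 (Nat.zero_le _) _ _ _ _ (InvA_zero A)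
    simpa [cntZ] using h
  · have hmaj' : ∀ v, 2 * cntZ A v ≤ (A.length : Int) := by
      intro v
      by_contra hc
      exact hmaj ⟨v, by omega⟩
    have hA := goA_eq_neg A hmaj' 0 (Nat.zero_le _) _ _ _ _ (InvA_zero A)
    simp only [Nat.cast_zero] at hA
    rw [hA]
    split_ifs with hpos hle hle2
    · rfl
    · exfalso
      rcases h0 : (fnVote (none, 0) A).1 with _ | v
      · rw [h0] at hle
        simp at hle
      · rw [h0] at hle
        simp only [not_le] at hle
        have hm := hmaj' v
        unfold cntZ at hm
        rw [PySem.List.count_eq] at hle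
        omega
    · rfl
    · exfalso
      have hn : (0:Int) ≤ A.length := by positivity
      omega
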